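-- pv_equiv track=rewrite | github.com/rhoitjadhav/competitive-programming-practice | codeforces/archive/1472D.Even-Odd Game.py | solve
-- ===== SOURCE A (Python) =====
-- def solve(arr):
--
--     alice = sorted([a for a in arr if a % 2 == 0], reverse=True)
--     bob = sorted([a for a in arr if a % 2 != 0], reverse=True)
--     alice_n = len(alice)
--     bob_n = len(bob)
--     alice_sum = 0
--     bob_sum = 0
--     turn = 0
--
--     i = 0
--     j = 0
--     while True:
--         if i == alice_n and j == bob_n:
--             break
--
--         if i == alice_n:
--             num = bob[j]
--             j += 1
--
--         elif j == bob_n: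
--             num = alice[i]
--             i += 1
--
--         else:
--             if alice[i] > bob[j]:
--                 num = alice[i]
--                 i += 1
--             elif bob[j] > alice[i]:
--                 num = bob[j]
--                 j += 1
--             else:
--                 num = alice[i]
--
--         if turn == 0:
--             if num % 2 == 0:
--                 alice_sum += num
--             turn = 1
--
--         else:
--             if num % 2 != 0:
--                 bob_sum += num
--             turn = 0
--
--     if alice_sum > bob_sum:
--         return 'Alice'
--     elif bob_sum > alice_sum:
--         return 'Bob'
--     else:
--         return 'Tie'
-- ===== SOURCE B (Python) =====
-- def solve(arr):
--     s = sorted(arr, reverse=True)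
--     alice_sum = 0
--     bob_sum = 0
--     for idx, num in enumerate(s):
--         if idx % 2 == 0:
--             if num % 2 == 0:
--                 alice_sum += num
--         else:
--             if num % 2 != 0:
--                 bob_sum += num
--     if alice_sum > bob_sum:
--         return 'Alice'
--     elif bob_sum > alice_sum:
--         return 'Bob'
--     else:
--         return 'Tie'
-- ===== Notes on version B (the rewrite author's own statement) =====
-- stated objective: simpler
-- what changed: B replaces A's even/odd partition into two lists and hand-written two-pointer merge loop with a single descending sort of the whole array and one enumerate pass that scores by index parity (even index = Alice's turn); sorting once and dropping the Python-level merge loop also measured faster by a constant factor.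
import Mathlib
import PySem

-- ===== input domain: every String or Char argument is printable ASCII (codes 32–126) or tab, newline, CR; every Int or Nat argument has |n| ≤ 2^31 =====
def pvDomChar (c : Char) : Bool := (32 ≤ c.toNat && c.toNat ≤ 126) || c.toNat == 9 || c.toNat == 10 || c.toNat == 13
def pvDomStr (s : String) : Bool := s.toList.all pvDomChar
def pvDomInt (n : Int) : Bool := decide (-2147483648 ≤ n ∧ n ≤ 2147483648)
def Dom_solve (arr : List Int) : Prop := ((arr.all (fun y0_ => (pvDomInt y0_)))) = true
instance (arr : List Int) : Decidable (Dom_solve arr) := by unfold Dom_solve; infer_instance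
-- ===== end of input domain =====

-- B replaces A's even/odd partition and two-pointer merge with one descending sort and a single index-parity pass (objective: simpler).

-- ===== PORT A =====
-- body of A's while loop after 'num' is chosen: returns (alice_sum, bob_sum, turn)
def solveStep (num turn alice_sum bob_sum : Int) : Int × Int × Int :=
  if turn == 0 then
    (if PySem.Int.mod num 2 == 0 then alice_sum + num else alice_sum, bob_sum, 1)
  else
    (alice_sum, if PySem.Int.mod num 2 != 0 then bob_sum + num else bob_sum, 0)

-- A's while loop; fuel only covers Python's divergence on equal heads (unreachable: one list is all even, the other all odd)
def solveLoop : Nat → List Int → List Int → Int → Int → Int → Int × Int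
  | 0, _, _, _, as_, bs => (as_, bs)
  | fuel+1, a, b, turn, as_, bs =>
    match a, b with
    | [], [] => (as_, bs)
    | [], y :: ys =>
        let r := solveStep y turn as_ bs
        solveLoop fuel [] ys r.2.2 r.1 r.2.1
    | x :: xs, [] =>
        let r := solveStep x turn as_ bs
        solveLoop fuel xs [] r.2.2 r.1 r.2.1
    | x :: xs, y :: ys =>
        if x > y then
          let r := solveStep x turn as_ bs
          solveLoop fuel xs (y :: ys) r.2.2 r.1 r.2.1
        else if y > x then
          let r := solveStep y turn as_ bs
          solveLoop fuel (x :: xs) ys r.2.2 r.1 r.2.1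
        else
          let r := solveStep x turn as_ bs
          solveLoop fuel (x :: xs) (y :: ys) r.2.2 r.1 r.2.1

def solve (arr : List Int) : String :=
  let alice := PySem.List.sorted (arr.filter (fun a => PySem.Int.mod a 2 == 0)) (fun x => x) true
  let bob := PySem.List.sorted (arr.filter (fun a => PySem.Int.mod a 2 != 0)) (fun x => x) true
  let r := solveLoop (alice.length + bob.length + 1) alice bob 0 0 0
  if r.1 > r.2 then "Alice" else if r.2 > r.1 then "Bob" else "Tie"

-- ===== PORT B =====
def solve_alt (arr : List Int) : String :=
  let s := PySem.List.sorted arr (fun x => x) true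
  let r := (PySem.List.enumerate s).foldl
    (fun (acc : Int × Int) (p : Int × Int) =>
      if PySem.Int.mod p.1 2 == 0 then
        (if PySem.Int.mod p.2 2 == 0 then (acc.1 + p.2, acc.2) else acc)
      else
        (if PySem.Int.mod p.2 2 != 0 then (acc.1, acc.2 + p.2) else acc))
    ((0 : Int), (0 : Int))
  if r.1 > r.2 then "Alice" else if r.2 > r.1 then "Bob" else "Tie"

-- ===== PRECONDITION & SPEC =====
def Spec_solve (arr : List Int) (out : String) : Prop := out = solve_alt arr
instance (arr : List Int) (out : String) : Decidable (Spec_solve arr out) := by unfold Spec_solve; infer_instance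

-- ===== CLAIM (what is proved, stated in full; the proofs are below) =====
def Claim_equal_solve : Prop := ∀ (arr : List Int), Dom_solve arr → Spec_solve arr (solve arr)

-- ===== LEMMAS AND PROOFS =====

-- the list A's two-pointer merge walks through (equal heads cannot occur in our use)
def mergeDesc : List Int → List Int → List Int
  | [], b => b
  | a, [] => a
  | x :: xs, y :: ys =>
      if x > y then x :: mergeDesc xs (y :: ys) else y :: mergeDesc (x :: xs) ys
termination_by a b => a.length + b.length

theorem mergeDesc_nil_right (a : List Int) : mergeDesc a [] = a := by
  cases a <;> simp [mergeDesc]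

-- A's per-element scoring, run down a single list
def scoreT : List Int → Int → Int → Int → Int × Int
  | [], _, as_, bs => (as_, bs)
  | n :: ns, turn, as_, bs =>
      let r := solveStep n turn as_ bs
      scoreT ns r.2.2 r.1 r.2.1

theorem mergeDesc_perm (a b : List Int) : (mergeDesc a b).Perm (a ++ b) := by
  fun_induction mergeDesc a b with
  | case1 b => simp
  | case2 a h => simp [mergeDesc_nil_right]
  | case3 x xs y ys h ih =>
      simpa [mergeDesc, h] using ih.cons x
  | case4 x xs y ys h ih =>
      exact (ih.cons y).trans List.perm_middle.symm

theorem mergeDesc_pairwise (a b : List Int)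
    (ha : a.Pairwise (· ≥ ·)) (hb : b.Pairwise (· ≥ ·)) :
    (mergeDesc a b).Pairwise (· ≥ ·) := by
  fun_induction mergeDesc a b with
  | case1 b => exact hb
  | case2 a h => exact ha
  | case3 x xs y ys h ih =>
      rcases List.pairwise_cons.mp ha with ⟨hx, hxs⟩
      refine List.pairwise_cons.mpr ⟨?_, ih hxs hb⟩
      intro z hz
      have hz' : z ∈ xs ++ y :: ys := (mergeDesc_perm xs (y :: ys)).mem_iff.mp hz
      rcases List.mem_append.mp hz' with h1 | h1
      · exact hx z h1
      · rcases List.mem_cons.mp h1 with rfl | h2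
        · omega
        · have := (List.pairwise_cons.mp hb).1 z h2
          omega
  | case4 x xs y ys h ih =>
      rcases List.pairwise_cons.mp hb with ⟨hy, hys⟩
      refine List.pairwise_cons.mpr ⟨?_, ih ha hys⟩
      intro z hz
      have hz' : z ∈ (x :: xs) ++ ys := (mergeDesc_perm (x :: xs) ys).mem_iff.mp hz
      rcases List.mem_append.mp hz' with h1 | h1
      · rcases List.mem_cons.mp h1 with rfl | h2
        · omega
        · have := (List.pairwise_cons.mp ha).1 z h2
          omega
      · exact hy z h1

theorem loop_eq_scoreT (fuel : Nat) :
    ∀ (a b : List Int) (turn as_ bs : Int),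
    (∀ x ∈ a, ∀ y ∈ b, x ≠ y) → a.length + b.length < fuel →
    solveLoop fuel a b turn as_ bs = scoreT (mergeDesc a b) turn as_ bs := by
  induction fuel with
  | zero => intro a b turn as_ bs _ hf; omega
  | succ n ih =>
      intro a b turn as_ bs hdisj hf
      match a, b with
      | [], [] => simp [solveLoop, mergeDesc, scoreT]
      | [], y :: ys =>
          simp only [solveLoop, mergeDesc, scoreT]
          have := ih [] ys (solveStep y turn as_ bs).2.2 (solveStep y turn as_ bs).1
            (solveStep y turn as_ bs).2.1 (by intro x hx; cases hx) (by simp at hf ⊢; omega)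
          simpa [mergeDesc] using this
      | x :: xs, [] =>
          simp only [solveLoop, mergeDesc, scoreT]
          have := ih xs [] (solveStep x turn as_ bs).2.2 (solveStep x turn as_ bs).1
            (solveStep x turn as_ bs).2.1 (by intro u hu y hy; cases hy) (by simp at hf ⊢; omega)
          simpa [mergeDesc_nil_right] using this
      | x :: xs, y :: ys =>
          have hxy : x ≠ y := hdisj x (by simp) y (by simp)
          by_cases hgt : x > y
          · simp only [solveLoop, mergeDesc, if_pos hgt, scoreT]
            exact ih xs (y :: ys) _ _ _
              (fun u hu v hv => hdisj u (List.mem_cons_of_mem _ hu) v hv)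
              (by simp at hf ⊢; omega)
          · have hlt : y > x := by omega
            simp only [solveLoop, mergeDesc, if_neg hgt, if_pos hlt, scoreT]
            exact ih (x :: xs) ys _ _ _
              (fun u hu v hv => hdisj u hu v (List.mem_cons_of_mem _ hv))
              (by simp at hf ⊢; omega)

theorem scoreT_eq_enum_foldl (l : List Int) :
    ∀ (i : Int) (as_ bs : Int), 0 ≤ i →
    (PySem.List.enumerate l i).foldl
      (fun (acc : Int × Int) (p : Int × Int) =>
        if PySem.Int.mod p.1 2 == 0 then
          (if PySem.Int.mod p.2 2 == 0 then (acc.1 + p.2, acc.2) else acc)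
        else
          (if PySem.Int.mod p.2 2 != 0 then (acc.1, acc.2 + p.2) else acc))
      (as_, bs)
    = scoreT l (PySem.Int.mod i 2) as_ bs := by
  induction l with
  | nil => intro i as_ bs hi; simp [PySem.List.enumerate_nil, scoreT]
  | cons x xs ih =>
      intro i as_ bs hi
      rw [PySem.List.enumerate_cons]
      have hmod : PySem.Int.mod i 2 = i % 2 := PySem.Int.mod_eq_emod_of_pos (by omega)
      have hmod1 : PySem.Int.mod (i+1) 2 = (i+1) % 2 := PySem.Int.mod_eq_emod_of_pos (by omega)
      rcases (by omega : i % 2 = 0 ∨ i % 2 = 1) with h0 | h1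
      · have hb : (PySem.Int.mod i 2 == 0) = true := by rw [hmod, h0]; rfl
        have ht1 : PySem.Int.mod (i+1) 2 = 1 := by rw [hmod1]; omega
        by_cases hbe : (PySem.Int.mod x 2 == 0) = true
        · simp only [List.foldl_cons, hb, hbe, if_true]
          rw [ih (i+1) (as_ + x) bs (by omega), ht1]
          simp only [scoreT, solveStep, hb, hbe] <;> simp
        · rw [Bool.not_eq_true] at hbe
          simp only [List.foldl_cons, hb, hbe, if_true, Bool.false_eq_true, if_false]
          rw [ih (i+1) as_ bs (by omega), ht1]
          simp only [scoreT, solveStep, hb, hbe] <;> simp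
      · have hb : (PySem.Int.mod i 2 == 0) = false := by rw [hmod, h1]; rfl
        have ht0 : PySem.Int.mod (i+1) 2 = 0 := by rw [hmod1]; omega
        by_cases hbo : (PySem.Int.mod x 2 != 0) = true
        · simp only [List.foldl_cons, hb, hbo, Bool.false_eq_true, if_false, if_true]
          rw [ih (i+1) as_ (bs + x) (by omega), ht0]
          simp only [scoreT, solveStep, hb, hbo] <;> simp
        · rw [Bool.not_eq_true] at hbo
          simp only [List.foldl_cons, hb, hbo, Bool.false_eq_true, if_false]
          rw [ih (i+1) as_ bs (by omega), ht0]
          simp only [scoreT, solveStep, hb, hbo] <;> simp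

theorem merge_eq_sorted (arr : List Int) :
    mergeDesc (PySem.List.sorted (arr.filter (fun a => PySem.Int.mod a 2 == 0)) (fun x => x) true)
              (PySem.List.sorted (arr.filter (fun a => PySem.Int.mod a 2 != 0)) (fun x => x) true)
    = PySem.List.sorted arr (fun x => x) true := by
  set alice := PySem.List.sorted (arr.filter (fun a => PySem.Int.mod a 2 == 0)) (fun x => x) true with halice
  set bob := PySem.List.sorted (arr.filter (fun a => PySem.Int.mod a 2 != 0)) (fun x => x) true with hbob
  have hpa : alice.Pairwise (· ≥ ·) := by
    have := PySem.List.sorted_pairwise_rev (xs := arr.filter (fun a => PySem.Int.mod a 2 == 0)) (key := fun x => x)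
    simpa [halice, GE.ge] using this
  have hpb : bob.Pairwise (· ≥ ·) := by
    have := PySem.List.sorted_pairwise_rev (xs := arr.filter (fun a => PySem.Int.mod a 2 != 0)) (key := fun x => x)
    simpa [hbob, GE.ge] using this
  have hperm : (mergeDesc alice bob).Perm (PySem.List.sorted arr (fun x => x) true) := by
    have h1 : (mergeDesc alice bob).Perm (alice ++ bob) := mergeDesc_perm _ _
    have h2 : (alice ++ bob).Perm
        (arr.filter (fun a => PySem.Int.mod a 2 == 0) ++ arr.filter (fun a => PySem.Int.mod a 2 != 0)) :=
      (PySem.List.sorted_perm _ _ _).append (PySem.List.sorted_perm _ _ _)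
    have h3 : (arr.filter (fun a => PySem.Int.mod a 2 == 0) ++ arr.filter (fun a => PySem.Int.mod a 2 != 0)).Perm arr := by
      have := List.filter_append_perm (fun a => PySem.Int.mod a 2 == 0) arr
      simpa [bne] using this
    have h4 : arr.Perm (PySem.List.sorted arr (fun x => x) true) :=
      (PySem.List.sorted_perm _ _ _).symm
    exact ((h1.trans h2).trans h3).trans h4
  have hps : (PySem.List.sorted arr (fun x => x) true).Pairwise (· ≥ ·) := by
    have := PySem.List.sorted_pairwise_rev (xs := arr) (key := fun x => x)
    simpa [GE.ge] using this
  have hma : (mergeDesc alice bob).Pairwise (fun a b => -a ≤ -b) :=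
    (mergeDesc_pairwise _ _ hpa hpb).imp (fun h => by omega)
  have hms : (PySem.List.sorted arr (fun x => x) true).Pairwise (fun a b => -a ≤ -b) :=
    hps.imp (fun h => by omega)
  exact PySem.List.eq_of_perm_of_pairwise_le_of_injective (fun x : Int => -x)
    neg_injective hperm hma hms

theorem alice_bob_disjoint (arr : List Int) :
    ∀ x ∈ PySem.List.sorted (arr.filter (fun a => PySem.Int.mod a 2 == 0)) (fun x => x) true,
    ∀ y ∈ PySem.List.sorted (arr.filter (fun a => PySem.Int.mod a 2 != 0)) (fun x => x) true,
    x ≠ y := by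
  intro x hx y hy
  rw [PySem.List.mem_sorted] at hx hy
  have hx' := (List.mem_filter.mp hx).2
  have hy' := (List.mem_filter.mp hy).2
  intro h
  subst h
  simp [bne] at hx' hy'
  omega

-- ===== VERDICT (by name: the statement is the Claim_ definition above) =====
theorem solve_spec : Claim_equal_solve := by
  intro arr _
  unfold Spec_solve solve solve_alt
  simp only []
  rw [loop_eq_scoreT _ _ _ _ _ _ (alice_bob_disjoint arr) (by omega)]
  rw [merge_eq_sorted arr]
  rw [scoreT_eq_enum_foldl _ 0 0 0 (by omega)]
  rfl
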